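-- pv_equiv track=rewrite | github.com/mich-chen/code-challenges | arrays/degree-of-array/degree_of_array.py | findShortestSubArray_faster
-- ===== SOURCE A (Python) =====
-- from typing import List
--
-- def findShortestSubArray_faster(nums: List[int]) -> int:
--
--     indexes = {}
--     for i, n in enumerate(nums):
--         if n in indexes:
--             indexes[n].append(i)
--         else:
--             indexes[n] = [i]
--
--     # alternatively using defaultdict: (slightly slower)
--     # indexes = defaultdict(list)
--     # for i, n in enumerate(nums):
--     #     indexes[n].append(i)
--
--     degree = max(len(lst) for lst in indexes.values())
--
--     return min([lst[-1] - lst[0] + 1 for lst in indexes.values() if len(lst) == degree])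
-- ===== SOURCE B (Python) =====
-- def findShortestSubArray_faster(nums):
--     count = {}
--     first = {}
--     best_deg = 0
--     best_len = 0
--     for i, n in enumerate(nums):
--         if n not in first:
--             first[n] = i
--         c = count.get(n, 0) + 1
--         count[n] = c
--         if c > best_deg:
--             best_deg = c
--             best_len = i - first[n] + 1
--         elif c == best_deg:
--             best_len = min(best_len, i - first[n] + 1)
--     return best_len
-- ===== Notes on version B (the rewrite author's own statement) =====
-- stated objective: alternative
-- what changed: B replaces A's three-phase grouping (dict of full index lists, then a max pass over group sizes, then a min pass over the filtered groups) by a single streaming pass that keeps only each value's count and first index and maintains the running degree and best length online (O(k) extra space instead of O(n), same time).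
import Mathlib
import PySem

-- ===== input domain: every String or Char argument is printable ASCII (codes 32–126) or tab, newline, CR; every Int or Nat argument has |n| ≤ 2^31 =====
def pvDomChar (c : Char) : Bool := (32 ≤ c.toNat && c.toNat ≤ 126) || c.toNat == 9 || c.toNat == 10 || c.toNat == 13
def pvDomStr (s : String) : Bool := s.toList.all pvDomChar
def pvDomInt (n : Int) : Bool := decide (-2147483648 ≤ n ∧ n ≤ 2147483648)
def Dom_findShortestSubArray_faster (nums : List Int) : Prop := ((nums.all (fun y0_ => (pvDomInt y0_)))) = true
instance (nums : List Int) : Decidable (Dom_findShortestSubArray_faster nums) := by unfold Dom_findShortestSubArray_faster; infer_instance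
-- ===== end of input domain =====

-- B does the same job in one streaming pass keeping only counts and first indices (O(k) extra space),
-- instead of A's dict of full index lists followed by a max pass and a min pass.

-- ===== PORT A =====
-- one loop iteration of A: `if n in indexes: indexes[n].append(i) else: indexes[n] = [i]`
def stepA (d : PySem.Dict Int (List Int)) (p : Int × Int) : PySem.Dict Int (List Int) :=
  if d.contains p.2 then d.modify p.2 [] (fun lst => lst ++ [p.1])
  else d.insert p.2 [p.1]

def findShortestSubArray_faster (nums : List Int) : Int :=
  let indexes := (PySem.List.enumerate nums).foldl stepA PySem.Dict.empty
  -- degree = max(len(lst) for lst in indexes.values())  (ValueError on empty → Pre_ excludes nums = [])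
  let degree := (PySem.List.max? (indexes.values.map (fun lst => PySem.List.len lst)) (fun y => y)).getD 0
  -- min([lst[-1] - lst[0] + 1 for lst in indexes.values() if len(lst) == degree])
  (PySem.List.min? ((indexes.values.filter (fun lst => PySem.List.len lst == degree)).map
      (fun lst => PySem.List.pyGetD lst (-1) 0 - PySem.List.pyGetD lst 0 0 + 1)) (fun y => y)).getD 0

-- ===== PORT B =====
structure BSt where
  cnt : PySem.Dict Int Int
  first : PySem.Dict Int Int
  deg : Int
  len : Int
deriving Repr, DecidableEq

-- one loop iteration of B over (i, n)
def altStep (st : BSt) (p : Int × Int) : BSt :=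
  let first := if st.first.contains p.2 then st.first else st.first.insert p.2 p.1
  let c := st.cnt.getD p.2 0 + 1
  let cnt := st.cnt.insert p.2 c
  if st.deg < c then ⟨cnt, first, c, p.1 - first.getD p.2 0 + 1⟩
  else if c = st.deg then ⟨cnt, first, st.deg, min st.len (p.1 - first.getD p.2 0 + 1)⟩
  else ⟨cnt, first, st.deg, st.len⟩

def findShortestSubArray_faster_alt (nums : List Int) : Int :=
  ((PySem.List.enumerate nums).foldl altStep ⟨PySem.Dict.empty, PySem.Dict.empty, 0, 0⟩).len

-- ===== PRECONDITION & SPEC =====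
-- Python A raises ValueError on the empty list (max() over an empty generator); that is the only exclusion.
def Pre_findShortestSubArray_faster (nums : List Int) : Prop := nums ≠ []
instance (nums : List Int) : Decidable (Pre_findShortestSubArray_faster nums) := by unfold Pre_findShortestSubArray_faster; infer_instance

def pvWitness_findShortestSubArray_faster : List Int := [1, 2, 2, 3, 1]

def Spec_findShortestSubArray_faster (nums : List Int) (out : Int) : Prop := out = findShortestSubArray_faster_alt nums
instance (nums : List Int) (out : Int) : Decidable (Spec_findShortestSubArray_faster nums out) := by unfold Spec_findShortestSubArray_faster; infer_instance

-- ===== CLAIM (what is proved, stated in full; the proofs are below) =====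
def Claim_equal_findShortestSubArray_faster : Prop := ∀ (nums : List Int), Dom_findShortestSubArray_faster nums → Pre_findShortestSubArray_faster nums → Spec_findShortestSubArray_faster nums (findShortestSubArray_faster nums)

-- ===== LEMMAS AND PROOFS =====

-- count of v in xs, as an Int
def cntI (xs : List Int) (v : Int) : Int := (xs.count v : Int)

-- index of the last occurrence of v in xs (meaningful when v ∈ xs)
def lastOcc : List Int → Int → Nat
  | [], _ => 0
  | _ :: xs, v => if v ∈ xs then lastOcc xs v + 1 else 0

-- lastIndex - firstIndex + 1
def spanI (xs : List Int) (v : Int) : Int := (lastOcc xs v : Int) - (xs.idxOf v : Int) + 1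

-- D is the degree of xs
def IsDeg (xs : List Int) (D : Int) : Prop :=
  (∃ v ∈ xs, cntI xs v = D) ∧ ∀ v ∈ xs, cntI xs v ≤ D

-- R is the minimal span among values of count D
def IsOut (xs : List Int) (D R : Int) : Prop :=
  (∃ v ∈ xs, cntI xs v = D ∧ spanI xs v = R) ∧ ∀ v ∈ xs, cntI xs v = D → R ≤ spanI xs v

lemma isDeg_uniq {xs : List Int} {D1 D2 : Int} (h1 : IsDeg xs D1) (h2 : IsDeg xs D2) : D1 = D2 := by
  obtain ⟨⟨v1, hv1, hc1⟩, hb1⟩ := h1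
  obtain ⟨⟨v2, hv2, hc2⟩, hb2⟩ := h2
  have := hb2 v1 hv1; have := hb1 v2 hv2; omega

lemma isOut_uniq {xs : List Int} {D R1 R2 : Int} (h1 : IsOut xs D R1) (h2 : IsOut xs D R2) : R1 = R2 := by
  obtain ⟨⟨v1, hv1, hc1, hs1⟩, hb1⟩ := h1
  obtain ⟨⟨v2, hv2, hc2, hs2⟩, hb2⟩ := h2
  have := hb2 v1 hv1 hc1; have := hb1 v2 hv2 hc2; omega

-- the list of indices of v in xs, as produced by A's grouping dict
def J (xs : List Int) (s v : Int) : List Int :=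
  ((PySem.List.enumerate xs s).filter (fun p => p.2 == v)).map (fun p => p.1)

lemma J_cons (x : Int) (xs : List Int) (s v : Int) :
    J (x :: xs) s v = (if x = v then [s] else []) ++ J xs (s + 1) v := by
  simp only [J, PySem.List.enumerate_cons, List.filter_cons]
  by_cases h : x = v <;> simp [h]

lemma J_length (xs : List Int) (s v : Int) : (J xs s v).length = xs.count v := by
  induction xs generalizing s with
  | nil => simp [J, PySem.List.enumerate]
  | cons y ys ih =>
    rw [J_cons]
    rcases eq_or_ne y v with rfl | h
    · simp [ih]
    · simp [h, ih]

lemma J_ne_nil {xs : List Int} {v : Int} (h : v ∈ xs) (s : Int) : J xs s v ≠ [] := by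
  have hl := J_length xs s v
  have hcnt : 0 < xs.count v := List.count_pos_iff.2 h
  intro hnil; rw [hnil] at hl; simp at hl; omega

lemma J_nil_of_not_mem {xs : List Int} {v : Int} (h : v ∉ xs) (s : Int) : J xs s v = [] := by
  have hl := J_length xs s v
  have hcnt : xs.count v = 0 := by
    simpa using (List.count_eq_zero.2 h)
  rw [hcnt] at hl
  exact List.eq_nil_of_length_eq_zero hl

lemma J_head {xs : List Int} {v : Int} (h : v ∈ xs) (s : Int) :
    (J xs s v).getD 0 0 = s + (xs.idxOf v : Int) := by
  induction xs generalizing s with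
  | nil => simp at h
  | cons y ys ih =>
    rw [J_cons]
    rcases eq_or_ne y v with rfl | hne
    · simp
    · have hv : v ∈ ys := by
        rcases List.mem_cons.1 h with rfl | hv
        · exact absurd rfl hne
        · exact hv
      rw [if_neg hne, List.nil_append, ih hv]
      rw [List.idxOf_cons, show (y == v) = false by simp [hne]]
      simp only [cond_false]
      push_cast; omega

lemma J_last {xs : List Int} {v : Int} (h : v ∈ xs) (s : Int) :
    (J xs s v).getLast? = some (s + (lastOcc xs v : Int)) := by
  induction xs generalizing s with
  | nil => simp at h
  | cons y ys ih =>
    rw [J_cons]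
    by_cases hv : v ∈ ys
    · rw [List.getLast?_append, ih hv]
      simp only [lastOcc, if_pos hv]
      push_cast
      simp [add_assoc, add_comm 1 (lastOcc ys v : Int)]
    · have hy : y = v := by
        rcases List.mem_cons.1 h with rfl | hv2
        · rfl
        · exact absurd hv2 hv
      subst hy
      rw [J_nil_of_not_mem hv, if_pos rfl]
      simp [lastOcc, hv]

-- A's grouping loop, rewritten through Dict.modify
lemma stepA_eq (d : PySem.Dict Int (List Int)) (p : Int × Int) :
    stepA d p = d.modify p.2 [] (fun lst => lst ++ [p.1]) := by
  by_cases hctn : d.contains p.2 = true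
  · simp [stepA, hctn]
  · have hctn' : d.contains p.2 = false := by simpa using hctn
    simp [stepA, hctn', PySem.Dict.modify, PySem.Dict.getD_of_not_contains _ _ hctn']

-- the grouping dict of A
def groupD (nums : List Int) : PySem.Dict Int (List Int) :=
  (PySem.List.enumerate nums).foldl stepA PySem.Dict.empty

lemma groupD_eq_swapped (nums : List Int) :
    groupD nums = ((PySem.List.enumerate nums).map Prod.swap).foldl
      (fun d p => d.modify p.1 [] (fun lst => lst ++ [p.2])) PySem.Dict.empty := by
  rw [List.foldl_map]
  unfold groupD
  congr 1
  funext d p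
  exact stepA_eq d p

lemma groupD_getD (nums : List Int) (v : Int) : (groupD nums).getD v [] = J nums 0 v := by
  rw [groupD_eq_swapped, PySem.Dict.getD_foldl_modify_append]
  rw [List.filter_map, List.map_map]
  have hf : ((fun (x : Int × Int) => x.2) ∘ Prod.swap) = fun (p : Int × Int) => p.1 :=
    funext (fun p => rfl)
  have hg : ((fun (p : Int × Int) => p.1 == v) ∘ Prod.swap) = fun (p : Int × Int) => p.2 == v :=
    funext (fun p => rfl)
  rw [hf, hg, PySem.Dict.getD_empty]
  simp [J]

lemma groupD_keys (nums : List Int) : (groupD nums).keys = PySem.Set.ofList nums := by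
  rw [groupD_eq_swapped,
      PySem.Dict.keys_foldl_modify_key ((PySem.List.enumerate nums).map Prod.swap)
        (fun p => p.1) [] (fun d p => fun lst => lst ++ [p.2]) PySem.Dict.empty]
  rw [List.map_map]
  have hf : ((fun (p : Int × Int) => p.1) ∘ Prod.swap) = fun (p : Int × Int) => p.2 :=
    funext (fun p => rfl)
  rw [hf, PySem.List.map_snd_enumerate nums 0, PySem.Dict.keys_empty]
  rfl

lemma groupD_keys_nodup (nums : List Int) : (groupD nums).keys.Nodup := by
  rw [groupD_keys]; exact PySem.Set.nodup_ofList nums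

lemma groupD_keys_mem (nums : List Int) (v : Int) : v ∈ (groupD nums).keys ↔ v ∈ nums := by
  rw [groupD_keys]; exact PySem.Set.mem_ofList nums v

lemma A_spec (nums : List Int) (h : nums ≠ []) :
    ∃ D, IsDeg nums D ∧ IsOut nums D (findShortestSubArray_faster nums) := by
  have hnodup := groupD_keys_nodup nums
  have hvals : (groupD nums).values = (groupD nums).keys.map (fun k => (groupD nums).getD k []) :=
    PySem.Dict.values_eq_map_keys _ hnodup []
  have hlen : ∀ v, PySem.List.len ((groupD nums).getD v []) = cntI nums v := by
    intro v
    rw [groupD_getD, PySem.List.len_eq, J_length]; rfl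
  have hspan : ∀ v ∈ nums,
      PySem.List.pyGetD ((groupD nums).getD v []) (-1) 0
        - PySem.List.pyGetD ((groupD nums).getD v []) 0 0 + 1 = spanI nums v := by
    intro v hv
    rw [groupD_getD]
    have hnil := J_ne_nil hv 0
    rw [PySem.List.pyGetD_neg_one _ _ hnil, PySem.List.pyGetD_zero]
    have hlast : (J nums 0 v).getLast hnil = 0 + (lastOcc nums v : Int) := by
      have h1 := List.getLast?_eq_some_getLast hnil
      have h2 := J_last hv 0
      rw [h1] at h2
      exact Option.some_injective _ h2
    rw [hlast, J_head hv 0, spanI]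
    ring
  -- membership in values
  have hvmem : ∀ lst, lst ∈ (groupD nums).values ↔
      ∃ v ∈ (groupD nums).keys, (groupD nums).getD v [] = lst := by
    intro lst; rw [hvals]; simp [List.mem_map]
  have hgmem : ∀ v ∈ nums, (groupD nums).getD v [] ∈ (groupD nums).values := by
    intro v hv
    exact (hvmem _).2 ⟨v, (groupD_keys_mem nums v).2 hv, rfl⟩
  -- the degree computed by A
  obtain ⟨w, hw⟩ := List.exists_mem_of_ne_nil nums h
  have hLmem : PySem.List.len ((groupD nums).getD w []) ∈
      (groupD nums).values.map (fun lst => PySem.List.len lst) :=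
    List.mem_map_of_mem (hgmem w hw)
  obtain ⟨m, hmax⟩ : ∃ m, PySem.List.max?
      ((groupD nums).values.map (fun lst => PySem.List.len lst)) (fun y => y) = some m := by
    cases hmx : PySem.List.max? ((groupD nums).values.map (fun lst => PySem.List.len lst)) (fun y => y) with
    | none =>
      rw [PySem.List.max?_eq_none_iff] at hmx
      rw [hmx] at hLmem
      simp at hLmem
    | some m => exact ⟨m, rfl⟩
  have hdeg : IsDeg nums m := by
    constructor
    · have hmem := PySem.List.max?_mem hmax
      obtain ⟨lst, hlst, hlstm⟩ := List.mem_map.1 hmem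
      obtain ⟨v, hvk, hveq⟩ := (hvmem lst).1 hlst
      refine ⟨v, (groupD_keys_mem nums v).1 hvk, ?_⟩
      rw [← hlen v, hveq, hlstm]
    · intro v hv
      have hmem : PySem.List.len ((groupD nums).getD v []) ∈
          (groupD nums).values.map (fun lst => PySem.List.len lst) :=
        List.mem_map_of_mem (hgmem v hv)
      have := PySem.List.max?_isMax hmax _ hmem
      rw [hlen v] at this
      exact this
  -- the filtered list of spans
  obtain ⟨v1, hv1, hcv1⟩ := hdeg.1
  have hfmem : ∀ v ∈ nums, cntI nums v = m →
      spanI nums v ∈ (((groupD nums).values.filter (fun lst => PySem.List.len lst == m)).map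
        (fun lst => PySem.List.pyGetD lst (-1) 0 - PySem.List.pyGetD lst 0 0 + 1)) := by
    intro v hv hcv
    have hfil : (groupD nums).getD v [] ∈
        (groupD nums).values.filter (fun lst => PySem.List.len lst == m) := by
      rw [List.mem_filter]
      exact ⟨hgmem v hv, by rw [beq_iff_eq, hlen v, hcv]⟩
    have := List.mem_map_of_mem (f := fun lst =>
      PySem.List.pyGetD lst (-1) 0 - PySem.List.pyGetD lst 0 0 + 1) hfil
    simpa only [hspan v hv] using this
  obtain ⟨r, hmin⟩ : ∃ r, PySem.List.min?
      (((groupD nums).values.filter (fun lst => PySem.List.len lst == m)).map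
        (fun lst => PySem.List.pyGetD lst (-1) 0 - PySem.List.pyGetD lst 0 0 + 1)) (fun y => y) = some r := by
    cases hmn : PySem.List.min? (((groupD nums).values.filter (fun lst => PySem.List.len lst == m)).map
        (fun lst => PySem.List.pyGetD lst (-1) 0 - PySem.List.pyGetD lst 0 0 + 1)) (fun y => y) with
    | none =>
      rw [PySem.List.min?_eq_none_iff] at hmn
      have := hfmem v1 hv1 hcv1
      rw [hmn] at this
      simp at this
    | some r => exact ⟨r, rfl⟩
  -- A's result is r
  have hAdef : findShortestSubArray_faster nums =
      (PySem.List.min? (((groupD nums).values.filter (fun lst => PySem.List.len lst ==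
          (PySem.List.max? ((groupD nums).values.map (fun lst => PySem.List.len lst)) (fun y => y)).getD 0)).map
          (fun lst => PySem.List.pyGetD lst (-1) 0 - PySem.List.pyGetD lst 0 0 + 1)) (fun y => y)).getD 0 := rfl
  rw [hmax] at hAdef
  simp only [Option.getD_some] at hAdef
  rw [hmin] at hAdef
  simp only [Option.getD_some] at hAdef
  refine ⟨m, hdeg, ?_, ?_⟩
  · -- the result is the span of some achiever
    rw [hAdef]
    have hrm := PySem.List.min?_mem hmin
    obtain ⟨lst, hlst, hlstr⟩ := List.mem_map.1 hrm
    rw [List.mem_filter] at hlst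
    obtain ⟨v, hvk, hveq⟩ := (hvmem lst).1 hlst.1
    have hvnum : v ∈ nums := (groupD_keys_mem nums v).1 hvk
    refine ⟨v, hvnum, ?_, ?_⟩
    · rw [← hlen v, hveq]
      exact beq_iff_eq.1 (hveq ▸ hlst.2)
    · rw [← hspan v hvnum, hveq, hlstr]
  · -- the result is minimal among achiever spans
    intro v hv hcv
    rw [hAdef]
    exact PySem.List.min?_isMin hmin _ (hfmem v hv hcv)

-- ----- B side -----

def BInv (xs : List Int) (st : BSt) : Prop :=
  (∀ v, st.cnt.getD v 0 = cntI xs v) ∧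
  (∀ v, st.first.get? v = if v ∈ xs then some ((xs.idxOf v : Int)) else none) ∧
  (∀ v ∈ xs, cntI xs v ≤ st.deg) ∧
  (xs = [] → st.deg = 0 ∧ st.len = 0) ∧
  (xs ≠ [] → (∃ v ∈ xs, cntI xs v = st.deg) ∧
             (∃ v ∈ xs, cntI xs v = st.deg ∧ spanI xs v = st.len) ∧
             (∀ v ∈ xs, cntI xs v = st.deg → st.len ≤ spanI xs v))

lemma cntI_snoc (xs : List Int) (x v : Int) :
    cntI (xs ++ [x]) v = cntI xs v + if v = x then 1 else 0 := by
  unfold cntI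
  rcases eq_or_ne v x with rfl | h
  · simp [List.count_append]
  · simp [List.count_append, h, (Ne.symm h)]

lemma idxOf_snoc_mem {xs : List Int} {v : Int} (h : v ∈ xs) (x : Int) :
    (xs ++ [x]).idxOf v = xs.idxOf v :=
  List.idxOf_append_of_mem h

lemma idxOf_snoc_self {xs : List Int} {x : Int} (h : x ∉ xs) :
    (xs ++ [x]).idxOf x = xs.length := by
  induction xs with
  | nil => simp
  | cons y ys ih =>
    simp only [List.mem_cons, not_or] at h
    simp [ih h.2, Ne.symm h.1]

lemma lastOcc_snoc_self (xs : List Int) (x : Int) : lastOcc (xs ++ [x]) x = xs.length := by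
  induction xs with
  | nil => simp [lastOcc]
  | cons y ys ih => simp [lastOcc, ih]

lemma lastOcc_snoc_ne {xs : List Int} {v x : Int} (hne : v ≠ x) (h : v ∈ xs) :
    lastOcc (xs ++ [x]) v = lastOcc xs v := by
  induction xs with
  | nil => simp at h
  | cons y ys ih =>
    rcases List.mem_cons.1 h with rfl | hv
    · by_cases hm : v ∈ ys <;> simp [lastOcc, hm, ih, hne]
    · simp [lastOcc, hv, ih hv]

lemma spanI_snoc_ne {xs : List Int} {v x : Int} (hne : v ≠ x) (h : v ∈ xs) :
    spanI (xs ++ [x]) v = spanI xs v := by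
  simp [spanI, lastOcc_snoc_ne hne h, idxOf_snoc_mem h]

lemma mem_snoc (xs : List Int) (x v : Int) : v ∈ xs ++ [x] ↔ v ∈ xs ∨ v = x := by
  simp

lemma BInv_step {xs : List Int} {st : BSt} (hI : BInv xs st) (x : Int) :
    BInv (xs ++ [x]) (altStep st ((xs.length : Int), x)) := by
  obtain ⟨hc, hf, hb, he, hne⟩ := hI
  set i : Int := (xs.length : Int) with hi
  set first' : PySem.Dict Int Int :=
    if st.first.contains x then st.first else st.first.insert x i with hfirst'
  set c : Int := st.cnt.getD x 0 + 1 with hcdef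
  have hctn : st.first.contains x = decide (x ∈ xs) := by
    rw [PySem.Dict.contains_eq_isSome_get?, hf x]
    by_cases hx : x ∈ xs <;> simp [hx]
  -- the updated first-occurrence dict is correct for xs ++ [x]
  have hf' : ∀ v, first'.get? v =
      if v ∈ xs ++ [x] then some (((xs ++ [x]).idxOf v : Int)) else none := by
    intro v
    by_cases hx : x ∈ xs
    · have : first' = st.first := by rw [hfirst', hctn]; simp [hx]
      rw [this, hf v]
      by_cases hv : v ∈ xs
      · rw [if_pos hv, if_pos ((mem_snoc xs x v).2 (Or.inl hv)), idxOf_snoc_mem hv]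
      · have hvx : v ≠ x := fun hvx => hv (hvx ▸ hx)
        rw [if_neg hv, if_neg (fun hm => by rcases (mem_snoc xs x v).1 hm with h' | h' <;> [exact hv h'; exact hvx h'])]
    · have hfirst'' : first' = st.first.insert x i := by rw [hfirst', hctn]; simp [hx]
      rw [hfirst'', PySem.Dict.get?_insert]
      rcases eq_or_ne v x with rfl | hvx
      · rw [if_pos rfl, if_pos ((mem_snoc _ _ _).2 (Or.inr rfl)), idxOf_snoc_self hx, hi]
      · rw [if_neg hvx, hf v]
        by_cases hv : v ∈ xs
        · rw [if_pos hv, if_pos ((mem_snoc xs x v).2 (Or.inl hv)), idxOf_snoc_mem hv]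
        · rw [if_neg hv, if_neg (fun hm => by rcases (mem_snoc xs x v).1 hm with h' | h' <;> [exact hv h'; exact hvx h'])]
  -- first'.getD x 0 is the first index of x in xs ++ [x]
  have hfgx : first'.getD x 0 = (((xs ++ [x]).idxOf x : Nat) : Int) := by
    rw [PySem.Dict.getD_eq_get?_getD, hf' x, if_pos ((mem_snoc xs x x).2 (Or.inr rfl))]
    rfl
  -- the new count of x
  have hcx : c = cntI (xs ++ [x]) x := by
    rw [hcdef, hc x, cntI_snoc]; simp
  -- the updated count dict is correct for xs ++ [x]
  have hcnt' : ∀ v, (st.cnt.insert x c).getD v 0 = cntI (xs ++ [x]) v := by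
    intro v
    rw [PySem.Dict.getD_insert]
    rcases eq_or_ne v x with rfl | hvx
    · rw [if_pos rfl, hcx]
    · rw [if_neg hvx, hc v, cntI_snoc, if_neg hvx, add_zero]
  -- counts of values other than x are unchanged
  have hcnt_ne : ∀ v, v ≠ x → cntI (xs ++ [x]) v = cntI xs v := by
    intro v hvx
    rw [cntI_snoc, if_neg hvx, add_zero]
  -- the span of x in xs ++ [x]
  have hspanx : i - first'.getD x 0 + 1 = spanI (xs ++ [x]) x := by
    rw [hfgx, spanI, lastOcc_snoc_self, hi]
  have hc0 : 0 ≤ cntI xs x := by unfold cntI; positivity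
  have hc1 : 1 ≤ c := by rw [hcdef, hc x]; omega
  have hsne : xs ++ [x] ≠ [] := by simp
  -- unfold the step and split on its branches
  show BInv (xs ++ [x])
    (if st.deg < c then ⟨st.cnt.insert x c, first', c, i - first'.getD x 0 + 1⟩
     else if c = st.deg then ⟨st.cnt.insert x c, first', st.deg, min st.len (i - first'.getD x 0 + 1)⟩
     else ⟨st.cnt.insert x c, first', st.deg, st.len⟩)
  split_ifs with h1 h2 <;> unfold BInv <;> dsimp only
  · -- c > st.deg : new degree c, achieved only by x
    refine ⟨hcnt', hf', ?_, fun habs => absurd habs hsne, fun _ => ⟨⟨x, (mem_snoc xs x x).2 (Or.inr rfl), hcx.symm⟩, ⟨x, (mem_snoc xs x x).2 (Or.inr rfl), hcx.symm, hspanx.symm⟩, ?_⟩⟩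
    · intro v hv
      rcases (mem_snoc xs x v).1 hv with hv' | rfl
      · rcases eq_or_ne v x with rfl | hvx
        · rw [← hcx]
        · rw [hcnt_ne v hvx]
          have := hb v hv'; omega
      · rw [← hcx]
    · intro v hv hcv
      rcases (mem_snoc xs x v).1 hv with hv' | rfl
      · rcases eq_or_ne v x with rfl | hvx
        · rw [← hspanx]
        · exfalso
          rw [hcnt_ne v hvx] at hcv
          have := hb v hv'; omega
      · rw [← hspanx]
  · -- c = st.deg : x joins the achievers, take the min
    have hdeg1 : 1 ≤ st.deg := h2 ▸ hc1
    have hxs : xs ≠ [] := by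
      intro habs; obtain ⟨hd0, _⟩ := he habs; omega
    obtain ⟨⟨v0, hv0, hcv0⟩, ⟨v1, hv1, hcv1, hsv1⟩, hlb⟩ := hne hxs
    have hcxx : cntI xs x = c - 1 := by rw [hcdef, hc x]; ring
    have hv0x : v0 ≠ x := by intro hv; rw [hv, hcxx] at hcv0; omega
    have hv1x : v1 ≠ x := by intro hv; rw [hv, hcxx] at hcv1; omega
    refine ⟨hcnt', hf', ?_, fun habs => absurd habs hsne, fun _ => ⟨⟨v0, (mem_snoc xs x v0).2 (Or.inl hv0), by rw [hcnt_ne v0 hv0x]; exact hcv0⟩, ?_, ?_⟩⟩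
    · intro v hv
      rcases (mem_snoc xs x v).1 hv with hv' | rfl
      · rcases eq_or_ne v x with rfl | hvx
        · rw [← hcx]; omega
        · rw [hcnt_ne v hvx]; exact hb v hv'
      · rw [← hcx]; omega
    · -- a witness for the new minimum
      rcases le_total (i - first'.getD x 0 + 1) st.len with hle | hle
      · refine ⟨x, (mem_snoc xs x x).2 (Or.inr rfl), by rw [← hcx]; omega, ?_⟩
        rw [← hspanx]; omega
      · refine ⟨v1, (mem_snoc xs x v1).2 (Or.inl hv1), by rw [hcnt_ne v1 hv1x]; exact hcv1, ?_⟩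
        rw [spanI_snoc_ne hv1x hv1, hsv1]; omega
    · -- lower bound
      intro v hv hcv
      rcases (mem_snoc xs x v).1 hv with hv' | rfl
      · rcases eq_or_ne v x with rfl | hvx
        · rw [← hspanx]; omega
        · rw [spanI_snoc_ne hvx hv']
          rw [hcnt_ne v hvx] at hcv
          have := hlb v hv' hcv; omega
      · rw [← hspanx]; omega
  · -- c < st.deg : nothing changes
    have hclt : c < st.deg := by omega
    have hdeg1 : 1 ≤ st.deg := by omega
    have hxs : xs ≠ [] := by
      intro habs; obtain ⟨hd0, _⟩ := he habs; omega
    obtain ⟨⟨v0, hv0, hcv0⟩, ⟨v1, hv1, hcv1, hsv1⟩, hlb⟩ := hne hxs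
    have hcxx : cntI xs x = c - 1 := by rw [hcdef, hc x]; ring
    have hv0x : v0 ≠ x := by intro hv; rw [hv, hcxx] at hcv0; omega
    have hv1x : v1 ≠ x := by intro hv; rw [hv, hcxx] at hcv1; omega
    refine ⟨hcnt', hf', ?_, fun habs => absurd habs hsne, fun _ => ⟨⟨v0, (mem_snoc xs x v0).2 (Or.inl hv0), by rw [hcnt_ne v0 hv0x]; exact hcv0⟩, ⟨v1, (mem_snoc xs x v1).2 (Or.inl hv1), by rw [hcnt_ne v1 hv1x]; exact hcv1, by rw [spanI_snoc_ne hv1x hv1]; exact hsv1⟩, ?_⟩⟩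
    · intro v hv
      rcases (mem_snoc xs x v).1 hv with hv' | rfl
      · rcases eq_or_ne v x with rfl | hvx
        · rw [← hcx]; omega
        · rw [hcnt_ne v hvx]; exact hb v hv'
      · rw [← hcx]; omega
    · intro v hv hcv
      rcases (mem_snoc xs x v).1 hv with hv' | rfl
      · rcases eq_or_ne v x with rfl | hvx
        · rw [← hcx] at hcv; omega
        · rw [spanI_snoc_ne hvx hv']
          rw [hcnt_ne v hvx] at hcv
          exact hlb v hv' hcv
      · rw [← hcx] at hcv; omega

lemma BInv_foldl (xs : List Int) :
    BInv xs ((PySem.List.enumerate xs).foldl altStep ⟨PySem.Dict.empty, PySem.Dict.empty, 0, 0⟩) := by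
  induction xs using List.reverseRecOn with
  | nil =>
    refine ⟨fun v => ?_, fun v => ?_, fun v hv => ?_, fun _ => ⟨rfl, rfl⟩, fun hne => absurd rfl hne⟩
    · simp [PySem.List.enumerate, cntI, PySem.Dict.getD_empty]
    · simp [PySem.List.enumerate, PySem.Dict.get?_empty]
    · simp at hv
  | append_singleton ys y ih =>
    have hsnoc : (PySem.List.enumerate (ys ++ [y])).foldl altStep
          (⟨PySem.Dict.empty, PySem.Dict.empty, 0, 0⟩ : BSt)
        = altStep ((PySem.List.enumerate ys).foldl altStep
            ⟨PySem.Dict.empty, PySem.Dict.empty, 0, 0⟩) ((ys.length : Int), y) := by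
      rw [PySem.List.enumerate_append, List.foldl_append]
      simp [PySem.List.enumerate]
    rw [hsnoc]
    exact BInv_step ih y

lemma B_spec (nums : List Int) (h : nums ≠ []) :
    ∃ D, IsDeg nums D ∧ IsOut nums D (findShortestSubArray_faster_alt nums) := by
  obtain ⟨hc, hf, hb, he, hne⟩ := BInv_foldl nums
  obtain ⟨hex, hlex, hlb⟩ := hne h
  exact ⟨_, ⟨hex, hb⟩, hlex, hlb⟩

-- ===== VERDICT (by name: the statement is the Claim_ definition above) =====
theorem findShortestSubArray_faster_spec : Claim_equal_findShortestSubArray_faster := by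
  intro nums _ hpre
  unfold Spec_findShortestSubArray_faster
  obtain ⟨D1, hd1, ho1⟩ := A_spec nums hpre
  obtain ⟨D2, hd2, ho2⟩ := B_spec nums hpre
  have hD : D1 = D2 := isDeg_uniq hd1 hd2
  subst hD
  exact isOut_uniq ho1 ho2
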